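-- pv_equiv track=rewrite | github.com/miliar/Code_Jam_Webscraper | solutions_python/Problem_58/36.py | iw
-- ===== SOURCE A (Python) =====
-- def iw(A, B):
--     q, r = divmod(A, B)
--     if q > 1:
--         return True
--     elif r == 0:
--         return False
--     else:
--         return not iw(B, r)
-- ===== SOURCE B (Python) =====
-- def _euclid_steps(A, B):
--     """Stage 1: collect the Euclid quotients taken before the game decides,
--     together with the deciding base result (q > 1 -> True, r == 0 -> False)."""
--     q, r = divmod(A, B)
--     if q > 1:
--         return [], True
--     if r == 0:
--         return [], False
--     rest, base = _euclid_steps(B, r)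
--     return [q] + rest, base
--
-- def iw(A, B):
--     steps, base = _euclid_steps(A, B)
--     # Stage 2: each intermediate step negates the result once.
--     return base != (len(steps) % 2 == 1)
-- ===== Notes on version B (the rewrite author's own statement) =====
-- stated objective: alternative
-- what changed: Instead of negating each recursive result in-line, B first materialises the list of Euclid quotients taken before the game decides together with the deciding base outcome, then in a second stage XORs the base with the parity of the list length.
import Mathlib
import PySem

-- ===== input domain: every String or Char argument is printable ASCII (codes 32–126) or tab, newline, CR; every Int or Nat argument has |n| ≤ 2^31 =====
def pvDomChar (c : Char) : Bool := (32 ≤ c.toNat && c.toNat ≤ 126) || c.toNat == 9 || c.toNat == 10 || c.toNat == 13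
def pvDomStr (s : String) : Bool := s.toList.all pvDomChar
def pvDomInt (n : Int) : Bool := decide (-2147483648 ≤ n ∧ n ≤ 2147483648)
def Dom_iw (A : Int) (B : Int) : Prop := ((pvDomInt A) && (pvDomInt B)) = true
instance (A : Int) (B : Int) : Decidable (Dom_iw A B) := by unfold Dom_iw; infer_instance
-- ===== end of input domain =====

-- B replaces A's self-negating recursion with two stages: first collect the Euclid
-- quotients taken before the game decides (plus the deciding base outcome), then
-- XOR the base with the parity of the collected list's length (objective:
-- alternative decomposition, same cost).

-- termination helper used by both ports (cited in decreasing_by)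
theorem pyMod_natAbs_lt (a b : Int) (hb : b ≠ 0) :
    (PySem.Int.mod a b).natAbs < b.natAbs := by
  rcases lt_or_gt_of_ne hb with h | h
  · have := PySem.Int.mod_neg_bounds a h
    omega
  · have h1 := PySem.Int.mod_nonneg a h
    have h2 := PySem.Int.mod_lt a h
    omega

-- ===== PORT A =====
-- literal transliteration of A; the B = 0 guard only makes the function total
-- (Python raises ZeroDivisionError there, excluded by Pre_iw)
def iw (A : Int) (B : Int) : Bool :=
  if hB : B = 0 then false
  else
    let q := PySem.Int.floordiv A B
    let r := PySem.Int.mod A B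
    if q > 1 then true
    else if r = 0 then false
    else !(iw B r)
termination_by B.natAbs
decreasing_by exact pyMod_natAbs_lt A B hB

-- ===== PORT B =====
-- stage 1 of Source B: the list of intermediate quotients and the deciding base outcome
def euclidSteps (A : Int) (B : Int) : List Int × Bool :=
  if hB : B = 0 then ([], false)
  else
    let q := PySem.Int.floordiv A B
    let r := PySem.Int.mod A B
    if q > 1 then ([], true)
    else if r = 0 then ([], false)
    else
      let p := euclidSteps B r
      (q :: p.1, p.2)
termination_by B.natAbs
decreasing_by exact pyMod_natAbs_lt A B hB

-- stage 2 of Source B: base != (len(steps) % 2 == 1)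
def iw_alt (A : Int) (B : Int) : Bool :=
  let p := euclidSteps A B
  p.2 != (p.1.length % 2 == 1)

-- ===== PRECONDITION & SPEC =====
-- Pre_ excludes only B = 0, where Python's divmod raises ZeroDivisionError (in both A and B)
def Pre_iw (A : Int) (B : Int) : Prop := B ≠ 0
instance (A : Int) (B : Int) : Decidable (Pre_iw A B) := by unfold Pre_iw; infer_instance
def pvWitness_iw : Int × Int := (22, 8)

def Spec_iw (A : Int) (B : Int) (out : Bool) : Prop := out = iw_alt A B
instance (A : Int) (B : Int) (out : Bool) : Decidable (Spec_iw A B out) := by unfold Spec_iw; infer_instance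

-- ===== CLAIM (what is proved, stated in full; the proofs are below) =====
def Claim_equal_iw : Prop := ∀ (A : Int) (B : Int), Dom_iw A B → Pre_iw A B → Spec_iw A B (iw A B)

-- ===== LEMMAS AND PROOFS =====
theorem euclidSteps_char (A B : Int) (hB : B ≠ 0) :
    ((euclidSteps A B).2 != ((euclidSteps A B).1.length % 2 == 1)) = iw A B := by
  rw [euclidSteps, iw]
  simp only [hB, dite_false]
  split_ifs with h1 h2
  · rfl
  · rfl
  · have ih := euclidSteps_char B (PySem.Int.mod A B) h2
    simp only [List.length_cons]
    rw [← ih]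
    rcases (euclidSteps B (PySem.Int.mod A B)) with ⟨s, b⟩
    rcases Nat.even_or_odd s.length with he | ho
    · have : s.length % 2 = 0 := Nat.even_iff.mp he
      have h1 : (s.length + 1) % 2 = 1 := by omega
      simp [this, h1]
    · have : s.length % 2 = 1 := Nat.odd_iff.mp ho
      have h1 : (s.length + 1) % 2 = 0 := by omega
      simp [this, h1]
termination_by B.natAbs
decreasing_by exact pyMod_natAbs_lt A B hB

-- ===== VERDICT (by name: the statement is the Claim_ definition above) =====
theorem iw_spec : Claim_equal_iw := by
  intro A B _ hB
  unfold Spec_iw iw_alt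
  exact (euclidSteps_char A B hB).symm
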